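-- pv_equiv track=rewrite | github.com/FISAAI03/FISAAI_CODING_TEST | Algorithm/PGS/LEVEL2/최솟값 만들기/조진원.py | solution
-- ===== SOURCE A (Python) =====
-- from collections import deque
--
-- def solution(A,B):
--     # 정렬 후, 큐 형태로 변환
--     A = deque(sorted(A))
--     B = deque(sorted(B))
--
--     answer = 0
--     # A 최소값 * B 최대값과 A 최대값 * B 최소값을 비교한다.
--     while A :
--         if A[0] * B[-1] > A[-1] * B[0] :
--             answer += A.popleft() * B.pop()
--         else :
--             answer += A.pop() * B.popleft()
--
--     return answer
-- ===== SOURCE B (Python) =====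
-- def solution(A, B):
--     # The greedy pairing depends only on how many times each branch is taken:
--     # the i-th element consumed from A's front is always paired with the i-th
--     # element from B's back, and the j-th from A's back with the j-th from B's
--     # front.  So precompute those two product sequences and merge them,
--     # taking the strictly larger head each step.
--     A = sorted(A)
--     B = sorted(B)
--     m, n = len(A), len(B)
--     L = [A[i] * B[n - 1 - i] for i in range(m)]
--     R = [A[m - 1 - j] * B[j] for j in range(m)]
--     a = r = 0
--     total = 0
--     for _ in range(m):
--         if L[a] > R[r]:
--             total += L[a]
--             a += 1
--         else:
--             total += R[r]
--             r += 1
--     return total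
-- ===== Notes on version B (the rewrite author's own statement) =====
-- stated objective: alternative
-- what changed: Replaces the deque-based two-ended greedy loop (re-reading and popping both ends of both deques each step) by precomputing the two fixed end-product sequences L[i]=A[i]*B[n-1-i] and R[j]=A[m-1-j]*B[j] and merging them, taking the larger head each step; no deques and no popping remain.
import Mathlib
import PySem

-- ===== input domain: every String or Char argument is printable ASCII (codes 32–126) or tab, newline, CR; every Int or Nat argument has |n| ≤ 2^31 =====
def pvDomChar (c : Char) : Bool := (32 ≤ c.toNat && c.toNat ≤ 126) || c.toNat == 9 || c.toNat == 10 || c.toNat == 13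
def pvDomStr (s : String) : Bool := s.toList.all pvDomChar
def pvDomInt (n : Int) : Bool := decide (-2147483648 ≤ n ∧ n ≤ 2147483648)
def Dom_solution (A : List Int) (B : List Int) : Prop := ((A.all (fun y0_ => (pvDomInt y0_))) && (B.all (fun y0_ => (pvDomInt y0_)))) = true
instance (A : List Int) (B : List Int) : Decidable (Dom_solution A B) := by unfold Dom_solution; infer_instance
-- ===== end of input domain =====

-- B drops A's deque-based two-ended greedy (popping both ends each step) for a
-- merge of the two precomputed end-product sequences; alternative decomposition, same cost.

-- ===== PORT A =====
-- the 'while A' loop: A, B are the two deques (front = popleft side, back = pop side)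
def solLoop : List Int → List Int → Int → Int
  | [], _, acc => acc
  | _ :: _, [], _ => 0  -- Python raises IndexError here (B[-1] on an empty deque); excluded by Pre_
  | a :: as, b :: bs, acc =>
    let aLast := (a :: as).getLast (by simp)
    let bLast := (b :: bs).getLast (by simp)
    if a * bLast > aLast * b then
      solLoop as (b :: bs).dropLast (acc + a * bLast)
    else
      solLoop (a :: as).dropLast bs (acc + aLast * b)
termination_by A _ _ => A.length
decreasing_by all_goals simp

def solution (A : List Int) (B : List Int) : Int :=
  solLoop (PySem.List.sorted A (fun x => x) false) (PySem.List.sorted B (fun x => x) false) 0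

-- ===== PORT B =====
-- Source B's merge loop: k steps remain, a / r are the two read pointers, total the sum
-- (indices are in range throughout the loop, so plain getD is exact for Source B's L[a] / R[r])
def mergeLoop (L R : List Int) : Nat → Nat → Nat → Int → Int
  | 0, _, _, total => total
  | Nat.succ k, a, r, total =>
    if L.getD a 0 > R.getD r 0 then mergeLoop L R k (a + 1) r (total + L.getD a 0)
    else mergeLoop L R k a (r + 1) (total + R.getD r 0)

def solution_alt (A : List Int) (B : List Int) : Int :=
  let SA := PySem.List.sorted A (fun x => x) false
  let SB := PySem.List.sorted B (fun x => x) false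
  let m := SA.length
  let n := SB.length
  let L := (List.range m).map (fun i => SA.getD i 0 * SB.getD (n - 1 - i) 0)
  let R := (List.range m).map (fun j => SA.getD (m - 1 - j) 0 * SB.getD j 0)
  mergeLoop L R m 0 0 0

-- ===== PRECONDITION & SPEC =====
-- Pre_ excludes only the inputs where the Python A raises: when len(A) > len(B) the B
-- deque empties while the loop on A continues and B[-1] raises IndexError.
def Pre_solution (A : List Int) (B : List Int) : Prop := A.length ≤ B.length
instance (A : List Int) (B : List Int) : Decidable (Pre_solution A B) := by unfold Pre_solution; infer_instance

def pvWitness_solution : List Int × List Int := ([1, 2], [3, 4, 5])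

def Spec_solution (A : List Int) (B : List Int) (out : Int) : Prop := out = solution_alt A B
instance (A : List Int) (B : List Int) (out : Int) : Decidable (Spec_solution A B out) := by unfold Spec_solution; infer_instance

-- ===== CLAIM (what is proved, stated in full; the proofs are below) =====
def Claim_equal_solution : Prop := ∀ (A : List Int) (B : List Int), Dom_solution A B → Pre_solution A B → Spec_solution A B (solution A B)

-- ===== LEMMAS AND PROOFS =====

-- A's loop, one step, for nonempty deques
lemma solLoop_nonempty (X Y : List Int) (hX : X ≠ []) (hY : Y ≠ []) (acc : Int) :
    solLoop X Y acc =
      if X.head hX * Y.getLast hY > X.getLast hX * Y.head hY then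
        solLoop X.tail Y.dropLast (acc + X.head hX * Y.getLast hY)
      else
        solLoop X.dropLast Y.tail (acc + X.getLast hX * Y.head hY) := by
  match X, Y with
  | x :: xs, y :: ys => rw [solLoop]; rfl

-- the invariant: after a front-steps and r back-steps on A, A's deques are the slices
-- X[a : a+k] and Y[r : n-a] and the remaining loop is exactly Source B's merge of L and R
lemma solLoop_merge (X Y : List Int) (hmn : X.length ≤ Y.length) :
    ∀ (k a r : Nat) (acc : Int), a + r + k = X.length →
      solLoop ((X.drop a).take k) ((Y.drop r).take (Y.length - a - r)) acc =
        mergeLoop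
          ((List.range X.length).map (fun i => X.getD i 0 * Y.getD (Y.length - 1 - i) 0))
          ((List.range X.length).map (fun j => X.getD (X.length - 1 - j) 0 * Y.getD j 0))
          k a r acc := by
  intro k
  induction k with
  | zero =>
    intro a r acc h
    simp [solLoop, mergeLoop]
  | succ k ih =>
    intro a r acc h
    have hXd : (X.drop a).length = r + (k + 1) := by simp; omega
    have hYd : (Y.drop r).length = Y.length - r := by simp
    have hXlen : ((X.drop a).take (k + 1)).length = k + 1 := by simp; omega
    have hYlen : ((Y.drop r).take (Y.length - a - r)).length = Y.length - a - r := by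
      simp; omega
    have hXne : (X.drop a).take (k + 1) ≠ [] := by
      intro hc; rw [hc] at hXlen; simp at hXlen
    have hYne : (Y.drop r).take (Y.length - a - r) ≠ [] := by
      intro hc; rw [hc] at hYlen; simp at hYlen; omega
    rw [solLoop_nonempty _ _ hXne hYne]
    -- the four ends of the two deques, as positions in the sorted originals
    have hXhead : ((X.drop a).take (k + 1)).head hXne = X.getD a 0 := by
      rw [List.head_eq_getElem, List.getElem_take, List.getElem_drop,
        List.getD_eq_getElem X 0 (by omega)]
      congr 1
    have hXlast : ((X.drop a).take (k + 1)).getLast hXne = X.getD (X.length - 1 - r) 0 := by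
      rw [List.getLast_eq_getElem, List.getElem_take, List.getElem_drop,
        List.getD_eq_getElem X 0 (by omega)]
      congr 1
      omega
    have hYhead : ((Y.drop r).take (Y.length - a - r)).head hYne = Y.getD r 0 := by
      rw [List.head_eq_getElem, List.getElem_take, List.getElem_drop,
        List.getD_eq_getElem Y 0 (by omega)]
      congr 1
    have hYlast : ((Y.drop r).take (Y.length - a - r)).getLast hYne =
        Y.getD (Y.length - 1 - a) 0 := by
      rw [List.getLast_eq_getElem, List.getElem_take, List.getElem_drop,
        List.getD_eq_getElem Y 0 (by omega)]
      congr 1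
      omega
    -- popping an end of a deque, as a slice one shorter
    have hXtail : ((X.drop a).take (k + 1)).tail = (X.drop (a + 1)).take k := by
      apply List.ext_getElem
      · simp; omega
      · intro i h1 h2
        simp only [List.getElem_tail, List.getElem_take, List.getElem_drop]
        congr 1
        omega
    have hXdrop : ((X.drop a).take (k + 1)).dropLast = (X.drop a).take k := by
      apply List.ext_getElem
      · simp; omega
      · intro i h1 h2
        simp only [List.getElem_dropLast, List.getElem_take]
    have hYtail : ((Y.drop r).take (Y.length - a - r)).tail =
        (Y.drop (r + 1)).take (Y.length - a - (r + 1)) := by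
      apply List.ext_getElem
      · simp; omega
      · intro i h1 h2
        simp only [List.getElem_tail, List.getElem_take, List.getElem_drop]
        congr 1
        omega
    have hYdrop : ((Y.drop r).take (Y.length - a - r)).dropLast =
        (Y.drop r).take (Y.length - (a + 1) - r) := by
      apply List.ext_getElem
      · simp; omega
      · intro i h1 h2
        simp only [List.getElem_dropLast, List.getElem_take]
    -- the two candidate products are exactly Source B's L[a] and R[r]
    have hLa : ((List.range X.length).map
        (fun i => X.getD i 0 * Y.getD (Y.length - 1 - i) 0)).getD a 0 =
        X.getD a 0 * Y.getD (Y.length - 1 - a) 0 := by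
      rw [List.getD_eq_getElem _ 0 (by simp; omega), List.getElem_map, List.getElem_range]
    have hRr : ((List.range X.length).map
        (fun j => X.getD (X.length - 1 - j) 0 * Y.getD j 0)).getD r 0 =
        X.getD (X.length - 1 - r) 0 * Y.getD r 0 := by
      rw [List.getD_eq_getElem _ 0 (by simp; omega), List.getElem_map, List.getElem_range]
    rw [hXhead, hXlast, hYhead, hYlast, hXtail, hXdrop, hYtail, hYdrop,
      mergeLoop, hLa, hRr]
    split
    · exact ih (a + 1) r _ (by omega)
    · exact ih a (r + 1) _ (by omega)

-- ===== VERDICT (by name: the statement is the Claim_ definition above) =====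
theorem solution_spec : Claim_equal_solution := by
  intro A B _ hpre
  unfold Spec_solution solution solution_alt
  have hmn : (PySem.List.sorted A (fun x => x) false).length ≤
      (PySem.List.sorted B (fun x => x) false).length := by
    simpa [PySem.List.length_sorted] using hpre
  have h := solLoop_merge _ _ hmn (PySem.List.sorted A (fun x => x) false).length 0 0 0 (by omega)
  simpa [List.take_of_length_le, PySem.List.length_sorted] using h
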